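-- pv_equiv track=rewrite | github.com/VaHiX/CodeForces | Python/ByTier/A/1874_A_Jellyfish_and_Game.py | jellyfishandGame
-- ===== SOURCE A (Python) =====
-- def jellyfishandGame(n, m, k, ns, ms):
--     # Determine how many rounds to simulate based on parity of k
--     loop = 0
--     if k % 2 == 0:
--         loop = 2  # Even k -> simulate 2 rounds to see pattern
--     else:
--         loop = 1  # Odd k -> simulate 1 round
--
--     # Simulate the game up to min(k, 2) rounds since after 2 rounds, further rounds will not change outcome
--     for i in range(1, loop + 1):
--         if i % 2 == 1:  # Jellyfish's turn (odd round)
--             # Find min in Jellyfish's apples and max in Gellyfish's apples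
--             minVal = min(ns)
--             maxVal = max(ms)
--             minIndex = ns.index(minVal)
--             maxIndex = ms.index(maxVal)
--             # Perform swap only if beneficial
--             if minVal < maxVal:
--                 ns[minIndex] = maxVal
--                 ms[maxIndex] = minVal
--         else:  # Gellyfish's turn (even round)
--             # Find min in Gellyfish's apples and max in Jellyfish's apples
--             minVal = min(ms)
--             maxVal = max(ns)
--             minIndex = ms.index(minVal)
--             maxIndex = ns.index(maxVal)
--             # Perform swap only if beneficial
--             if minVal < maxVal:
--                 ms[minIndex] = maxVal
--                 ns[maxIndex] = minVal
--     return sum(ns)  # Return final sum of Jellyfish's apples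
-- ===== SOURCE B (Python) =====
-- def jellyfishandGame(n, m, k, ns, ms):
--     # Arithmetic, no round loop and no list mutation (A mutates ns/ms in place;
--     # this matches A's return value only).
--     s = sum(ns)
--     a, b = min(ns), max(ms)
--     swapped = a < b
--     if swapped:
--         s += b - a
--     if k % 2 == 0:
--         m2 = min(min(ms), a) if swapped else min(ms)
--         M2 = max(max(ns), b) if swapped else max(ns)
--         if m2 < M2:
--             s -= M2 - m2
--     return s
-- ===== Notes on version B (the rewrite author's own statement) =====
-- stated objective: simpler
-- what changed: Replaces A's round loop with in-place list mutation, index lookups and re-scans by a direct arithmetic computation: one pass of min/max per list plus closed-form expressions for the post-round-1 extrema, never touching the lists.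
import Mathlib
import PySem

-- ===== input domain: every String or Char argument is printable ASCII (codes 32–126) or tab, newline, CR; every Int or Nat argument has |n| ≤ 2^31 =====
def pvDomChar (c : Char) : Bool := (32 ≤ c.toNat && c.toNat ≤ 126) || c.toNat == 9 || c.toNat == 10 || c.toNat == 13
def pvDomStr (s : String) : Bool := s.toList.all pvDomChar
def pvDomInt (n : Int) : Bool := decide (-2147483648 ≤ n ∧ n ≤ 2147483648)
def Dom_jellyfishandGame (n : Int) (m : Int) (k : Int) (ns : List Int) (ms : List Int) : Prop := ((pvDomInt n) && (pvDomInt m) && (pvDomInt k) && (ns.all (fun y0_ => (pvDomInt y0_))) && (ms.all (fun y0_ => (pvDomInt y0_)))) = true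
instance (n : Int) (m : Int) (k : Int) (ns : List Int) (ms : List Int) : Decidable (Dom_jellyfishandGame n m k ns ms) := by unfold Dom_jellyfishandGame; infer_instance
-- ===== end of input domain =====

-- B drops A's round loop and list mutation and computes the result arithmetically
-- from min/max of the two lists (objective: simpler).  A mutates ns/ms in place;
-- the equivalence proved here is about the RETURN value only.

-- ===== PORT A =====
-- one iteration of A's `for i in range(1, loop + 1)` body, state = (ns, ms)
def jfgStep (st : List Int × List Int) (i : Int) : List Int × List Int :=
  let ns := st.1
  let ms := st.2
  if i % 2 == 1 then
    let minVal := (PySem.List.min? ns (fun y => y)).getD 0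
    let maxVal := (PySem.List.max? ms (fun y => y)).getD 0
    let minIndex := (PySem.List.index? ns minVal).getD 0
    let maxIndex := (PySem.List.index? ms maxVal).getD 0
    if minVal < maxVal then (ns.set minIndex maxVal, ms.set maxIndex minVal)
    else (ns, ms)
  else
    let minVal := (PySem.List.min? ms (fun y => y)).getD 0
    let maxVal := (PySem.List.max? ns (fun y => y)).getD 0
    let minIndex := (PySem.List.index? ms minVal).getD 0
    let maxIndex := (PySem.List.index? ns maxVal).getD 0
    if minVal < maxVal then (ns.set maxIndex minVal, ms.set minIndex maxVal)
    else (ns, ms)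

def jellyfishandGame (n : Int) (m : Int) (k : Int) (ns : List Int) (ms : List Int) : Int :=
  let loop : Int := if k % 2 == 0 then 2 else 1
  ((PySem.List.pyRange 1 (loop + 1) 1).foldl jfgStep (ns, ms)).1.sum

-- ===== PORT B =====
def jellyfishandGame_alt (n : Int) (m : Int) (k : Int) (ns : List Int) (ms : List Int) : Int :=
  let s := ns.sum
  let a := (PySem.List.min? ns (fun y => y)).getD 0
  let b := (PySem.List.max? ms (fun y => y)).getD 0
  let swapped := a < b
  let s := if swapped then s + (b - a) else s
  if k % 2 == 0 then
    let m2 := if swapped then min ((PySem.List.min? ms (fun y => y)).getD 0) a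
              else (PySem.List.min? ms (fun y => y)).getD 0
    let M2 := if swapped then max ((PySem.List.max? ns (fun y => y)).getD 0) b
              else (PySem.List.max? ns (fun y => y)).getD 0
    if m2 < M2 then s - (M2 - m2) else s
  else s

-- ===== PRECONDITION & SPEC =====
-- Pre_ excludes empty ns or ms, on which A raises ValueError (min/max of empty list).
def Pre_jellyfishandGame (n : Int) (m : Int) (k : Int) (ns : List Int) (ms : List Int) : Prop :=
  ns ≠ [] ∧ ms ≠ []
instance (n : Int) (m : Int) (k : Int) (ns : List Int) (ms : List Int) : Decidable (Pre_jellyfishandGame n m k ns ms) := by unfold Pre_jellyfishandGame; infer_instance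

def pvWitness_jellyfishandGame : Int × Int × Int × List Int × List Int := (2, 2, 1, [1, 2], [3, 4])

def Spec_jellyfishandGame (n : Int) (m : Int) (k : Int) (ns : List Int) (ms : List Int) (out : Int) : Prop := out = jellyfishandGame_alt n m k ns ms
instance (n : Int) (m : Int) (k : Int) (ns : List Int) (ms : List Int) (out : Int) : Decidable (Spec_jellyfishandGame n m k ns ms out) := by unfold Spec_jellyfishandGame; infer_instance

-- ===== CLAIM (what is proved, stated in full; the proofs are below) =====
def Claim_equal_jellyfishandGame : Prop := ∀ (n : Int) (m : Int) (k : Int) (ns : List Int) (ms : List Int), Dom_jellyfishandGame n m k ns ms → Pre_jellyfishandGame n m k ns ms → Spec_jellyfishandGame n m k ns ms (jellyfishandGame n m k ns ms)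

-- ===== LEMMAS AND PROOFS =====

-- abbreviations used only in the proofs
def jfgMin (l : List Int) : Int := (PySem.List.min? l (fun y => y)).getD 0
def jfgMax (l : List Int) : Int := (PySem.List.max? l (fun y => y)).getD 0

theorem jfgMin_mem (l : List Int) (h : l ≠ []) : jfgMin l ∈ l := by
  unfold jfgMin
  cases hm : PySem.List.min? l (fun y => y) with
  | none => exact absurd ((PySem.List.min?_eq_none_iff l _).1 hm) h
  | some m => simpa using PySem.List.min?_mem hm

theorem jfgMin_isMin (l : List Int) (h : l ≠ []) : ∀ y ∈ l, jfgMin l ≤ y := by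
  unfold jfgMin
  cases hm : PySem.List.min? l (fun y => y) with
  | none => exact absurd ((PySem.List.min?_eq_none_iff l _).1 hm) h
  | some m => simpa using PySem.List.min?_isMin hm

theorem jfgMax_mem (l : List Int) (h : l ≠ []) : jfgMax l ∈ l := by
  unfold jfgMax
  cases hm : PySem.List.max? l (fun y => y) with
  | none => exact absurd ((PySem.List.max?_eq_none_iff l _).1 hm) h
  | some m => simpa using PySem.List.max?_mem hm

theorem jfgMax_isMax (l : List Int) (h : l ≠ []) : ∀ y ∈ l, y ≤ jfgMax l := by
  unfold jfgMax
  cases hm : PySem.List.max? l (fun y => y) with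
  | none => exact absurd ((PySem.List.max?_eq_none_iff l _).1 hm) h
  | some m => simpa using PySem.List.max?_isMax hm

theorem jfgMax_eq_of (l : List Int) (M : Int) (hM : M ∈ l) (hub : ∀ y ∈ l, y ≤ M) :
    jfgMax l = M := by
  have hne : l ≠ [] := by rintro rfl; simp at hM
  exact le_antisymm (hub _ (jfgMax_mem l hne)) (jfgMax_isMax l hne _ hM)

theorem jfgMin_eq_of (l : List Int) (m : Int) (hm : m ∈ l) (hlb : ∀ y ∈ l, m ≤ y) :
    jfgMin l = m := by
  have hne : l ≠ [] := by rintro rfl; simp at hm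
  exact le_antisymm (jfgMin_isMin l hne _ hm) (hlb _ (jfgMin_mem l hne))

theorem sum_set_int (l : List Int) (i : Nat) (v : Int) (hi : i < l.length) :
    (l.set i v).sum = l.sum - l[i] + v := by
  induction l generalizing i with
  | nil => simp at hi
  | cons x t ih =>
    cases i with
    | zero => simp [List.set]; ring
    | succ j =>
      have hj : j < t.length := by simpa using hi
      simp [List.set, ih j hj]; ring

theorem mem_set_self_int (l : List Int) (i : Nat) (v : Int) (hi : i < l.length) :
    v ∈ l.set i v :=
  List.mem_iff_getElem.2 ⟨i, by simpa using hi, List.getElem_set_self _⟩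

theorem jfgMin_def (l : List Int) : (PySem.List.min? l (fun y => y)).getD 0 = jfgMin l := rfl
theorem jfgMax_def (l : List Int) : (PySem.List.max? l (fun y => y)).getD 0 = jfgMax l := rfl

theorem jfgMax_set_min (l : List Int) (i : Nat) (v : Int) (hi : i < l.length)
    (hmin : ∀ y ∈ l, l[i] ≤ y) (hv : l[i] ≤ v) :
    jfgMax (l.set i v) = max (jfgMax l) v := by
  have hne : l ≠ [] := by rintro rfl; simp at hi
  apply jfgMax_eq_of
  · rcases le_total (jfgMax l) v with hle | hle
    · rw [max_eq_right hle]
      exact mem_set_self_int l i v hi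
    · rw [max_eq_left hle]
      obtain ⟨j, hj, hjv⟩ := List.getElem_of_mem (jfgMax_mem l hne)
      by_cases hij : j = i
      · have hji : l[j]'hj = l[i]'hi := by simp [hij]
        have hMv : jfgMax l ≤ v := by rw [← hjv, hji]; exact hv
        rw [le_antisymm hMv hle]
        exact mem_set_self_int l i v hi
      · exact List.mem_iff_getElem.2
          ⟨j, by simpa using hj, by rw [List.getElem_set_ne (by omega)]; exact hjv⟩
  · intro y hy
    rcases List.mem_or_eq_of_mem_set hy with hyl | rfl
    · exact le_max_of_le_left (jfgMax_isMax l hne _ hyl)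
    · exact le_max_right _ _

theorem jfgMin_set_max (l : List Int) (i : Nat) (v : Int) (hi : i < l.length)
    (hmax : ∀ y ∈ l, y ≤ l[i]) (hv : v ≤ l[i]) :
    jfgMin (l.set i v) = min (jfgMin l) v := by
  have hne : l ≠ [] := by rintro rfl; simp at hi
  apply jfgMin_eq_of
  · rcases le_total v (jfgMin l) with hle | hle
    · rw [min_eq_right hle]
      exact mem_set_self_int l i v hi
    · rw [min_eq_left hle]
      obtain ⟨j, hj, hjv⟩ := List.getElem_of_mem (jfgMin_mem l hne)
      by_cases hij : j = i
      · have hji : l[j]'hj = l[i]'hi := by simp [hij]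
        have hvm : v ≤ jfgMin l := by rw [← hjv, hji]; exact hv
        rw [← le_antisymm hvm hle]
        exact mem_set_self_int l i v hi
      · exact List.mem_iff_getElem.2
          ⟨j, by simpa using hj, by rw [List.getElem_set_ne (by omega)]; exact hjv⟩
  · intro y hy
    rcases List.mem_or_eq_of_mem_set hy with hyl | rfl
    · exact min_le_of_left_le (jfgMin_isMin l hne _ hyl)
    · exact min_le_right _ _

theorem index?_getD_spec (l : List Int) (v : Int) (hv : v ∈ l) :
    ∃ i : Nat, ∃ hi : i < l.length, (PySem.List.index? l v).getD 0 = i ∧ l[i] = v := by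
  have hs : (PySem.List.index? l v).isSome := (PySem.List.index?_isSome_iff l v).2 hv
  obtain ⟨i, hi⟩ := Option.isSome_iff_exists.1 hs
  obtain ⟨hk, hval, -⟩ := PySem.List.getElem_of_index?_eq_some hi
  exact ⟨i, hk, by rw [hi]; rfl, hval⟩

-- facts about A's first (odd) round: nonemptiness preserved, the new sum, and the
-- post-round max of ns / min of ms
theorem jfgStep_one_spec (ns ms : List Int) (hns : ns ≠ []) (hms : ms ≠ []) :
    (jfgStep (ns, ms) 1).1 ≠ [] ∧ (jfgStep (ns, ms) 1).2 ≠ [] ∧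
    (jfgStep (ns, ms) 1).1.sum =
      (if jfgMin ns < jfgMax ms then ns.sum - jfgMin ns + jfgMax ms else ns.sum) ∧
    jfgMax (jfgStep (ns, ms) 1).1 =
      (if jfgMin ns < jfgMax ms then max (jfgMax ns) (jfgMax ms) else jfgMax ns) ∧
    jfgMin (jfgStep (ns, ms) 1).2 =
      (if jfgMin ns < jfgMax ms then min (jfgMin ms) (jfgMin ns) else jfgMin ms) := by
  obtain ⟨i, hi, hgi, hvi⟩ := index?_getD_spec ns (jfgMin ns) (jfgMin_mem ns hns)
  obtain ⟨j, hj, hgj, hvj⟩ := index?_getD_spec ms (jfgMax ms) (jfgMax_mem ms hms)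
  by_cases hlt : jfgMin ns < jfgMax ms
  · have hstep : jfgStep (ns, ms) 1 = (ns.set i (jfgMax ms), ms.set j (jfgMin ns)) := by
      simp only [jfgStep, show ((1 : Int) % 2 == 1) = true from rfl, if_true,
        jfgMin_def, jfgMax_def]
      rw [hgi, hgj, if_pos hlt]
    rw [hstep]
    refine ⟨by simp [← List.length_pos_iff]; exact List.length_pos_iff.2 hns, 
           by simp [← List.length_pos_iff]; exact List.length_pos_iff.2 hms, ?_, ?_, ?_⟩
    · rw [if_pos hlt]
      simpa [hvi] using sum_set_int ns i (jfgMax ms) hi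
    · rw [if_pos hlt]
      exact jfgMax_set_min ns i (jfgMax ms) hi
        (fun y hy => hvi ▸ jfgMin_isMin ns hns y hy) (hvi ▸ le_of_lt hlt)
    · rw [if_pos hlt]
      exact jfgMin_set_max ms j (jfgMin ns) hj
        (fun y hy => hvj ▸ jfgMax_isMax ms hms y hy) (hvj ▸ le_of_lt hlt)
  · have hstep : jfgStep (ns, ms) 1 = (ns, ms) := by
      simp only [jfgStep, show ((1 : Int) % 2 == 1) = true from rfl, if_true,
        jfgMin_def, jfgMax_def]
      rw [if_neg hlt]
    rw [hstep, if_neg hlt, if_neg hlt, if_neg hlt]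
    exact ⟨hns, hms, rfl, rfl, rfl⟩

-- the sum of ns after A's second (even) round
theorem jfgStep_two_sum (ns ms : List Int) (hns : ns ≠ []) (hms : ms ≠ []) :
    (jfgStep (ns, ms) 2).1.sum =
      (if jfgMin ms < jfgMax ns then ns.sum - jfgMax ns + jfgMin ms else ns.sum) := by
  obtain ⟨i, hi, hgi, hvi⟩ := index?_getD_spec ms (jfgMin ms) (jfgMin_mem ms hms)
  obtain ⟨j, hj, hgj, hvj⟩ := index?_getD_spec ns (jfgMax ns) (jfgMax_mem ns hns)
  by_cases hlt : jfgMin ms < jfgMax ns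
  · have hstep : jfgStep (ns, ms) 2 = (ns.set j (jfgMin ms), ms.set i (jfgMax ns)) := by
      simp only [jfgStep, show ((2 : Int) % 2 == 1) = false from rfl, Bool.false_eq_true,
        if_false, jfgMin_def, jfgMax_def]
      rw [hgi, hgj, if_pos hlt]
    rw [hstep, if_pos hlt]
    simpa [hvj] using sum_set_int ns j (jfgMin ms) hj
  · have hstep : jfgStep (ns, ms) 2 = (ns, ms) := by
      simp only [jfgStep, show ((2 : Int) % 2 == 1) = false from rfl, Bool.false_eq_true,
        if_false, jfgMin_def, jfgMax_def]
      rw [if_neg hlt]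
    rw [hstep, if_neg hlt]

-- ===== VERDICT (by name: the statement is the Claim_ definition above) =====
theorem jellyfishandGame_spec : Claim_equal_jellyfishandGame := by
  intro n m k ns ms _ hpre
  obtain ⟨hns, hms⟩ := hpre
  unfold Spec_jellyfishandGame jellyfishandGame jellyfishandGame_alt
  by_cases hk : k % 2 = 0
  · -- loop = 2, A simulates two rounds
    have hbk : (k % 2 == 0) = true := by simp [hk]
    simp only [hbk, if_true]
    rw [show PySem.List.pyRange 1 (2 + 1) 1 = [1, 2] from by decide]
    obtain ⟨h1, h2, hsum, hmax, hmin⟩ := jfgStep_one_spec ns ms hns hms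
    have heta : jfgStep (ns, ms) 1 = ((jfgStep (ns, ms) 1).1, (jfgStep (ns, ms) 1).2) := rfl
    have hsum2 := jfgStep_two_sum (jfgStep (ns, ms) 1).1 (jfgStep (ns, ms) 1).2 h1 h2
    show (jfgStep (jfgStep (ns, ms) 1) 2).1.sum = _
    rw [heta, hsum2, hmin, hmax, hsum]
    simp only [jfgMin_def, jfgMax_def]
    split_ifs <;> omega
  · -- loop = 1, a single round
    have hbk : (k % 2 == 0) = false := by simpa using hk
    simp only [hbk, Bool.false_eq_true, if_false]
    rw [show PySem.List.pyRange 1 (1 + 1) 1 = [1] from by decide]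
    obtain ⟨-, -, hsum, -, -⟩ := jfgStep_one_spec ns ms hns hms
    show (jfgStep (ns, ms) 1).1.sum = _
    rw [hsum]
    simp only [jfgMin_def, jfgMax_def]
    split_ifs <;> omega
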